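-- pv_equiv track=rewrite | github.com/christophermoverton/stratlake-trade-engine | src/research/regime_policy_stress_tests.py | _index_scenario_rows
-- ===== SOURCE A (Python) =====
-- from typing import Any, Mapping
--
-- def _index_scenario_rows(rows: list[dict[str, Any]]) -> dict[str, dict[str, Any]]:
--     indexed: dict[str, dict[str, Any]] = {}
--     for row in rows:
--         scenario_name = str(row.get("scenario_name"))
--         if scenario_name in indexed:
--             continue
--         indexed[scenario_name] = dict(row)
--     return indexed
-- ===== SOURCE B (Python) =====
-- def _index_scenario_rows(rows):
--     # Reverse-overwrite pass: the first occurrence is written last, so it wins;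
--     # then restore first-appearance key order with dict.fromkeys.
--     first = {}
--     for row in reversed(rows):
--         first[str(row.get("scenario_name"))] = dict(row)
--     order = dict.fromkeys(str(row.get("scenario_name")) for row in rows)
--     return {name: first[name] for name in order}
-- ===== Notes on version B (the rewrite author's own statement) =====
-- stated objective: alternative
-- what changed: Replaces the guarded single forward pass (membership check, conditional insert) by a branch-free reverse-overwrite pass (first occurrence written last wins) plus a dict.fromkeys pass that restores first-appearance key order.
import Mathlib
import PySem

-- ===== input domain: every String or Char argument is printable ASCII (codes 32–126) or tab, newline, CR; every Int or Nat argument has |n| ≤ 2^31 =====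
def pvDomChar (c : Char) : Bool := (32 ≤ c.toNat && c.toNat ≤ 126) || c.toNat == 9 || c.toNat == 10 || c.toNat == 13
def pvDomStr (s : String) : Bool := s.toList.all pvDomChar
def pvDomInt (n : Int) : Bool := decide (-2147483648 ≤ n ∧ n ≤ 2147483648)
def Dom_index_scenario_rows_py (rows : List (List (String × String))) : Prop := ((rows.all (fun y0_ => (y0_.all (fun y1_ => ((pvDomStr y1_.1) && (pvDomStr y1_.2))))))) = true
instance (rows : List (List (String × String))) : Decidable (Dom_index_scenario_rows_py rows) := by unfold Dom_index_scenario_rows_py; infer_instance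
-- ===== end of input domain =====

-- B is a branch-free reverse-overwrite + fromkeys-ordering re-implementation of A's guarded single pass;
-- proved to return exactly A's value (same keys, same values, same insertion order) on every input.

-- shared helper: str(row.get("scenario_name")) — dict lookup (first match), "None" when the key is absent
def rowName (row : List (String × String)) : String :=
  match row.find? (fun p => p.1 = "scenario_name") with
  | some p => p.2
  | none => "None"

-- ===== PORT A =====
-- loop body of A: if scenario_name in indexed: continue; indexed[scenario_name] = dict(row)
def stepA (d : PySem.Dict String (List (String × String))) (row : List (String × String)) :
    PySem.Dict String (List (String × String)) :=
  let name := rowName row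
  if d.contains name then d else d.insert name row

def index_scenario_rows_py (rows : List (List (String × String))) : List (String × List (String × String)) :=
  (rows.foldl stepA PySem.Dict.empty).items

-- ===== PORT B =====
def index_scenario_rows_py_alt (rows : List (List (String × String))) : List (String × List (String × String)) :=
  let first : PySem.Dict String (List (String × String)) :=
    rows.reverse.foldl (fun d row => d.insert (rowName row) row) PySem.Dict.empty
  let order := PySem.List.dedup (rows.map rowName)
  -- first[name]: the key is always present (every name in order comes from rows); getD [] is the total form
  order.map (fun name => (name, first.getD name []))

-- ===== PRECONDITION & SPEC =====
def Spec_index_scenario_rows_py (rows : List (List (String × String))) (out : List (String × List (String × String))) : Prop := out = index_scenario_rows_py_alt rows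
instance (rows : List (List (String × String))) (out : List (String × List (String × String))) : Decidable (Spec_index_scenario_rows_py rows out) := by unfold Spec_index_scenario_rows_py; infer_instance

-- ===== CLAIM (what is proved, stated in full; the proofs are below) =====
def Claim_equal_index_scenario_rows_py : Prop := ∀ (rows : List (List (String × String))), Dom_index_scenario_rows_py rows → Spec_index_scenario_rows_py rows (index_scenario_rows_py rows)

-- ===== LEMMAS AND PROOFS =====

-- canonical first-occurrence index, by structural recursion
def canonIdx : List (List (String × String)) → List (String × List (String × String))
  | [] => []
  | r :: rs => (rowName r, r) :: (canonIdx rs).filter (fun p => p.1 ≠ rowName r)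

theorem goA_eq (rows : List (List (String × String)))
    (d : PySem.Dict String (List (String × String))) :
    (rows.foldl stepA d).items
      = d.items ++ (canonIdx rows).filter (fun p => d.contains p.1 = false) := by
  induction rows generalizing d with
  | nil => simp [canonIdx]
  | cons r rs ih =>
    simp only [List.foldl_cons, stepA]
    by_cases h : d.contains (rowName r) = true
    · rw [if_pos h, ih d]
      congr 1
      rw [canonIdx, List.filter_cons]
      simp only [h, Bool.true_eq_false, decide_false, Bool.false_eq_true, if_false]
      rw [List.filter_filter]
      apply List.filter_congr
      intro p _
      by_cases hp : p.1 = rowName r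
      · simp [hp, h]
      · simp [hp]
    · have hF : d.contains (rowName r) = false := by simpa using h
      rw [if_neg h, ih (d.insert (rowName r) r),
        PySem.Dict.items_insert_of_not_contains _ _ hF, canonIdx, List.filter_cons,
        if_pos (by simp [hF])]
      simp only [List.append_assoc, List.singleton_append]
      congr 2
      rw [List.filter_filter]
      apply List.filter_congr
      intro p _
      by_cases hp : p.1 = rowName r
      · simp [hp, hF]
      · simp [hp, PySem.Dict.contains_insert]

theorem A_eq_canon (rows : List (List (String × String))) :
    index_scenario_rows_py rows = canonIdx rows := by
  unfold index_scenario_rows_py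
  rw [goA_eq]
  have he : (PySem.Dict.empty : PySem.Dict String (List (String × String))).items = [] := rfl
  simp [he, PySem.Dict.contains_empty]

theorem firstDict_getD (rows : List (List (String × String))) (n : String) :
    ((rows.reverse.foldl (fun d row => d.insert (rowName row) row)
        (PySem.Dict.empty : PySem.Dict String (List (String × String)))).getD n [])
      = (match rows.find? (fun row => rowName row = n) with
         | some r => r
         | none => []) := by
  rw [List.foldl_reverse]
  induction rows with
  | nil => simp
  | cons r rs ih =>
    simp only [List.foldr_cons, List.find?_cons]
    by_cases h : rowName r = n
    · subst h
      simp [PySem.Dict.getD_insert_self]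
    · rw [PySem.Dict.getD_insert]
      simp only [Ne.symm h, if_false]
      simpa [h] using ih

-- accumulator form of dict.fromkeys / set building (first occurrences kept)
theorem setFold_eq (ns : List String) (s : List String) :
    ns.foldl PySem.Set.add s
      = s ++ (ns.foldl PySem.Set.add []).filter (fun x => !decide (x ∈ s)) := by
  induction ns generalizing s with
  | nil => simp
  | cons n ns ih =>
    have ha0 : PySem.Set.add ([] : List String) n = [n] := rfl
    rw [List.foldl_cons, List.foldl_cons, ha0, ih [n]]
    by_cases hm : n ∈ s
    · have ha : PySem.Set.add s n = s := by
        simp [PySem.Set.add, PySem.Set.contains, hm]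
      rw [ha, ih s, List.filter_append]
      have h1 : ([n].filter (fun x => !decide (x ∈ s))) = [] := by simp [hm]
      rw [h1, List.filter_filter]
      simp only [List.nil_append]
      congr 1
      apply List.filter_congr
      intro x _
      by_cases hx : x = n
      · simp [hx, hm]
      · simp [hx]
    · have ha : PySem.Set.add s n = s ++ [n] := by
        simp [PySem.Set.add, PySem.Set.contains, hm]
      rw [ha, ih (s ++ [n]), List.filter_append]
      have h1 : ([n].filter (fun x => !decide (x ∈ s))) = [n] := by simp [hm]
      rw [h1, List.filter_filter, List.append_assoc, List.singleton_append]
      congr 2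
      apply List.filter_congr
      intro x _
      by_cases hx : x = n
      · simp [hx, hm]
      · simp [hx]

theorem dedup_cons (n : String) (ns : List String) :
    PySem.List.dedup (n :: ns) = n :: (PySem.List.dedup ns).filter (fun m => m ≠ n) := by
  have h1 : PySem.List.dedup (n :: ns) = (n :: ns).foldl PySem.Set.add [] := rfl
  have h2 : PySem.List.dedup ns = ns.foldl PySem.Set.add [] := rfl
  have ha0 : PySem.Set.add ([] : List String) n = [n] := rfl
  rw [h1, h2, List.foldl_cons, ha0, setFold_eq ns [n], List.singleton_append]
  congr 1
  apply List.filter_congr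
  intro x _
  by_cases hx : x = n <;> simp [hx]

-- map fst commutes with the key filter (stated for our pair type)
theorem map_fst_filter (l : List (String × List (String × String))) (n : String) :
    (l.filter (fun p => p.1 ≠ n)).map Prod.fst
      = (l.map Prod.fst).filter (fun m => m ≠ n) := by
  induction l with
  | nil => rfl
  | cons a l ih => by_cases ha : a.1 = n <;> simpa [ha] using ih

theorem canon_keys (rows : List (List (String × String))) :
    (canonIdx rows).map Prod.fst = PySem.List.dedup (rows.map rowName) := by
  induction rows with
  | nil => rfl
  | cons r rs ih =>
    simp only [canonIdx, List.map_cons, dedup_cons, ← ih]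
    rw [map_fst_filter]

theorem canon_find (rows : List (List (String × String))) (p : String × List (String × String))
    (hp : p ∈ canonIdx rows) :
    rows.find? (fun row => rowName row = p.1) = some p.2 := by
  induction rows with
  | nil => simp [canonIdx] at hp
  | cons r rs ih =>
    simp only [canonIdx, List.mem_cons, List.mem_filter] at hp
    rcases hp with h | ⟨h1, h2⟩
    · subst h; simp
    · have hne : p.1 ≠ rowName r := by simpa using h2
      rw [List.find?_cons_of_neg (by simpa using Ne.symm hne)]
      exact ih h1

-- ===== VERDICT (by name: the statement is the Claim_ definition above) =====
theorem index_scenario_rows_py_spec : Claim_equal_index_scenario_rows_py := by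
  intro rows _
  unfold Spec_index_scenario_rows_py
  rw [A_eq_canon]
  unfold index_scenario_rows_py_alt
  rw [← canon_keys, List.map_map]
  conv_lhs => rw [← List.map_id (canonIdx rows)]
  apply List.map_congr_left
  intro p hp
  simp only [Function.comp_apply, id_eq]
  rw [firstDict_getD, canon_find rows p hp]
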